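-- pv_equiv track=rewrite | github.com/jianershi/algorithm | lintcode/movie_rating.py | movie_rating
-- ===== SOURCE A (Python) =====
-- def movie_rating(ratings):
--     if not ratings:
--         return 0
--
--     n = len(ratings)
--
--     dp = [[0] * 2 for _ in range(n + 1)]
--
--     dp[0][0] = 0
--     dp[0][1] = 0
--
--     for i in range(1, n + 1):
--         dp[i][0] = dp[i - 1][1] #skipping current step, then previous step cannot be skipped
--         dp[i][1] = max(dp[i - 1][0], dp[i - 1][1]) + ratings[i - 1] #not skipping current step, then previous step can either be skipepd or not skipped
--
--     return max(dp[n])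
-- ===== SOURCE B (Python) =====
-- def movie_rating(ratings):
--     # Dual formulation: the watched sum is maximal exactly when the total of the
--     # SKIPPED elements is minimal, and the skipped positions may not be adjacent.
--     # So compute the minimum total of a (possibly empty) non-adjacent subset of
--     # ratings and subtract it from the overall sum.
--     skip2 = skip1 = 0  # min skipped total for prefixes ending 2 resp. 1 ago
--     for r in ratings:
--         skip2, skip1 = skip1, min(skip1, skip2 + r)
--     return sum(ratings) - skip1
-- ===== Notes on version B (the rewrite author's own statement) =====
-- stated objective: alternative
-- what changed: Solves the dual problem: instead of A's two-state table maximizing the watched sum, B minimizes the total of the skipped (non-adjacent) elements with a min-recurrence in two scalars and returns sum(ratings) minus that minimum.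
import Mathlib
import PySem

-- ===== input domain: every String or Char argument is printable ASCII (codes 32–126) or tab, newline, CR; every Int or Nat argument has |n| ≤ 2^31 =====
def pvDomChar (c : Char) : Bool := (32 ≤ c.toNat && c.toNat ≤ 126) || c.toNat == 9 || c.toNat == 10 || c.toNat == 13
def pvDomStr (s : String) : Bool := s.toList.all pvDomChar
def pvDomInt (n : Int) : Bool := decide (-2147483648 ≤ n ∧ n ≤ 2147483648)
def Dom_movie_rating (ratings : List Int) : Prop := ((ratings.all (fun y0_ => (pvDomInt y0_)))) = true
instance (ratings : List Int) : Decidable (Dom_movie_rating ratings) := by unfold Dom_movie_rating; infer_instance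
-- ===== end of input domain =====

-- B solves the dual problem: it minimizes the total of the skipped (non-adjacent) elements
-- and returns sum(ratings) minus that minimum, instead of A's max-taken DP table (objective: alternative).

-- ===== PORT A =====
-- one loop iteration of A's for-loop: dp[i][0] = dp[i-1][1]; dp[i][1] = max(dp[i-1][0], dp[i-1][1]) + ratings[i-1]
def mrStepA (ratings : List Int) (dp : List (Int × Int)) (i : Int) : List (Int × Int) :=
  let dp1 := PySem.List.pySetD dp i
      ((PySem.List.pyGetD dp (i - 1) ((0 : Int), (0 : Int))).2,
       (PySem.List.pyGetD dp i ((0 : Int), (0 : Int))).2)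
  PySem.List.pySetD dp1 i
      ((PySem.List.pyGetD dp1 i ((0 : Int), (0 : Int))).1,
       max (PySem.List.pyGetD dp1 (i - 1) ((0 : Int), (0 : Int))).1
           (PySem.List.pyGetD dp1 (i - 1) ((0 : Int), (0 : Int))).2
         + PySem.List.pyGetD ratings (i - 1) 0)

def movie_rating (ratings : List Int) : Int :=
  if ratings = [] then 0
  else
    let n : Nat := ratings.length
    -- dp = [[0] * 2 for _ in range(n + 1)]  (each row [0,0] modelled as a pair)
    let dp0 : List (Int × Int) := List.replicate (n + 1) ((0 : Int), (0 : Int))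
    -- dp[0][0] = 0 ; dp[0][1] = 0
    let dp1 := PySem.List.pySetD dp0 0 ((0 : Int), (PySem.List.pyGetD dp0 0 ((0 : Int), (0 : Int))).2)
    let dp2 := PySem.List.pySetD dp1 0 ((PySem.List.pyGetD dp1 0 ((0 : Int), (0 : Int))).1, (0 : Int))
    let dpF := (PySem.List.pyRange 1 ((n : Int) + 1) 1).foldl (mrStepA ratings) dp2
    -- return max(dp[n])  (max of the two-element row)
    let last := PySem.List.pyGetD dpF (n : Int) ((0 : Int), (0 : Int))
    max last.1 last.2

-- ===== PORT B =====
-- state (skip2, skip1); step: skip2, skip1 = skip1, min(skip1, skip2 + r)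
def mrStepC (st : Int × Int) (r : Int) : Int × Int := (st.2, min st.2 (st.1 + r))

def movie_rating_alt (ratings : List Int) : Int :=
  let s := ratings.foldl mrStepC ((0 : Int), (0 : Int))
  ratings.sum - s.2

-- ===== PRECONDITION & SPEC =====
def Spec_movie_rating (ratings : List Int) (out : Int) : Prop := out = movie_rating_alt ratings
instance (ratings : List Int) (out : Int) : Decidable (Spec_movie_rating ratings out) := by unfold Spec_movie_rating; infer_instance

-- ===== CLAIM (what is proved, stated in full; the proofs are below) =====
def Claim_equal_movie_rating : Prop := ∀ (ratings : List Int), Dom_movie_rating ratings → Spec_movie_rating ratings (movie_rating ratings)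

-- ===== LEMMAS AND PROOFS =====

-- proof-only rolling two-variable form of A's recurrence (not used by either port)
def mrStepB (st : Int × Int) (r : Int) : Int × Int := (st.2, max st.2 st.1 + r)

-- after A's two no-op writes, the table is still all (0,0)
lemma mr_init (n : Nat) :
    (let dp0 : List (Int × Int) := List.replicate (n + 1) ((0 : Int), (0 : Int))
     let dp1 := PySem.List.pySetD dp0 0 ((0 : Int), (PySem.List.pyGetD dp0 0 ((0 : Int), (0 : Int))).2)
     PySem.List.pySetD dp1 0 ((PySem.List.pyGetD dp1 0 ((0 : Int), (0 : Int))).1, (0 : Int)))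
    = List.replicate (n + 1) ((0 : Int), (0 : Int)) := by
  simp [List.replicate_succ, PySem.List.pyGetD_zero_cons, PySem.List.pySetD_of_nonneg]

-- loop invariant: after the first k iterations, the table has length n+1 and its k-th row
-- is the rolling mrStepB state over the first k ratings
lemma mr_inv (ratings : List Int) : ∀ (k : Nat), k ≤ ratings.length →
    (let dpk := (PySem.List.pyRange 1 ((k : Int) + 1) 1).foldl (mrStepA ratings)
        (List.replicate (ratings.length + 1) ((0 : Int), (0 : Int)))
     dpk.length = ratings.length + 1 ∧
       PySem.List.pyGetD dpk (k : Int) ((0 : Int), (0 : Int))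
         = (ratings.take k).foldl mrStepB ((0 : Int), (0 : Int))) := by
  intro k
  induction k with
  | zero =>
      intro _
      simp [PySem.List.pyRange_one_eq_nil (le_refl (1:Int)), List.replicate_succ,
        PySem.List.pyGetD_zero_cons]
  | succ k ih =>
      intro hk
      have hkn : k < ratings.length := by omega
      obtain ⟨hlen, hget⟩ := ih (by omega)
      set dpk := (PySem.List.pyRange 1 ((k : Int) + 1) 1).foldl (mrStepA ratings)
        (List.replicate (ratings.length + 1) ((0 : Int), (0 : Int))) with hdpk
      have hsplit : PySem.List.pyRange 1 (((k + 1 : Nat) : Int) + 1) 1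
          = PySem.List.pyRange 1 ((k : Int) + 1) 1 ++ [(k : Int) + 1] := by
        push_cast
        exact PySem.List.pyRange_one_succ_right (by omega)
      rw [hsplit, List.foldl_append]
      simp only [List.foldl_cons, List.foldl_nil, ← hdpk]
      -- evaluate one iteration mrStepA dpk (k+1)
      have hi : ((k : Int) + 1) = ((k + 1 : Nat) : Int) := by push_cast; ring
      have hi1 : ((k : Int) + 1 - 1) = ((k : Nat) : Int) := by ring
      have hr : PySem.List.pyGetD ratings ((k : Int) + 1 - 1) 0 = ratings[k] := by
        rw [hi1, PySem.List.pyGetD_natCast, List.getD_eq_getElem?_getD,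
          List.getElem?_eq_getElem hkn]
        rfl
      have hstep : mrStepA ratings dpk ((k : Int) + 1)
          = dpk.set (k + 1) (((ratings.take k).foldl mrStepB ((0 : Int), (0 : Int))).2,
              max ((ratings.take k).foldl mrStepB ((0 : Int), (0 : Int))).1
                  ((ratings.take k).foldl mrStepB ((0 : Int), (0 : Int))).2
                + ratings[k]) := by
        unfold mrStepA
        rw [hi1] at *
        rw [hi]
        simp only [PySem.List.pySetD_natCast, PySem.List.pyGetD_natCast] at *
        rw [hget, hr]
        have h1 : k + 1 < dpk.length := by omega
        have h2 : (dpk.set (k+1) (((ratings.take k).foldl mrStepB ((0:Int),(0:Int))).2,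
            (dpk.getD (k+1) ((0:Int),(0:Int))).2)).getD (k+1) ((0:Int),(0:Int))
            = (((ratings.take k).foldl mrStepB ((0:Int),(0:Int))).2,
               (dpk.getD (k+1) ((0:Int),(0:Int))).2) := by
          simp [List.getD_eq_getElem?_getD, List.getElem?_set_self h1]
        have h3 : ∀ v : Int × Int, (dpk.set (k+1) v).getD k ((0:Int),(0:Int))
            = dpk.getD k ((0:Int),(0:Int)) := by
          intro v
          simp [List.getD_eq_getElem?_getD, List.getElem?_set_ne (by omega : k + 1 ≠ k)]
        rw [h2, h3, hget, List.set_set]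
      rw [hstep]
      refine ⟨by simp [hlen], ?_⟩
      have htake : ratings.take (k + 1) = ratings.take k ++ [ratings[k]] := by
        rw [List.take_add_one, List.getElem?_eq_getElem hkn]
        rfl
      rw [PySem.List.pyGetD_natCast, htake, List.foldl_append]
      have h1 : k + 1 < dpk.length := by omega
      simp [List.getD_eq_getElem?_getD, List.getElem?_set_self h1, mrStepB, max_comm]

-- duality bridge: the max-taken rolling state and the min-skip rolling state determine
-- each other through the running total T; the invariant is preserved by each element
lemma mr_dual (rs : List Int) : ∀ (stB stC : Int × Int) (T : Int),
    stB.2 = T - stC.1 → max stB.1 stB.2 = T - stC.2 →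
    max (rs.foldl mrStepB stB).1 (rs.foldl mrStepB stB).2
      = (T + rs.sum) - (rs.foldl mrStepC stC).2 := by
  induction rs with
  | nil => intro stB stC T h1 h2; simpa using h2
  | cons r rs ih =>
      intro stB stC T h1 h2
      simp only [List.foldl_cons, List.sum_cons]
      have h1' : (mrStepB stB r).2 = (T + r) - (mrStepC stC r).1 := by
        simp only [mrStepB, mrStepC]; omega
      have h2' : max (mrStepB stB r).1 (mrStepB stB r).2 = (T + r) - (mrStepC stC r).2 := by
        simp only [mrStepB, mrStepC]; omega
      rw [ih (mrStepB stB r) (mrStepC stC r) (T + r) h1' h2', add_assoc]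

-- ===== VERDICT (by name: the statement is the Claim_ definition above) =====
theorem movie_rating_spec : Claim_equal_movie_rating := by
  unfold Claim_equal_movie_rating Spec_movie_rating
  intro ratings _
  by_cases h : ratings = []
  · subst h; rfl
  · have hinit := mr_init ratings.length
    have hinv := mr_inv ratings ratings.length (le_refl _)
    have hdual := mr_dual ratings ((0 : Int), (0 : Int)) ((0 : Int), (0 : Int)) 0
      (by simp) (by simp)
    simp only [movie_rating, movie_rating_alt, if_neg h]
    dsimp only [] at hinit hinv
    rw [hinit, hinv.2, List.take_length, hdual, zero_add]
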